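-- pv_equiv track=rewrite | github.com/sgsokol/influx | influx_si/tools_ssg.py | iterbit
-- ===== SOURCE A (Python) =====
-- def iterbit(i, size=0):
--     r"""iterator on bits in integer starting from 0-position. The iterator stops at highest non-zero bit"""
--     i=int(i)
--     moveb=1
--     b_no=0
--     while (moveb <= i and size==0) or (b_no < size):
--         yield (1 if (moveb&i) else 0)
--         moveb<<=1
--         b_no+=1
-- ===== SOURCE B (Python) =====
-- def iterbit(i, size=0):
--     r"""iterator on bits in integer starting from 0-position. The iterator stops at highest non-zero bit"""
--     i = int(i)
--     n = size if size else max(i, 0).bit_length()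
--     if n > 0:
--         for c in reversed(format(i & ((1 << n) - 1), 'b').zfill(n)):
--             yield ord(c) - 48
-- ===== Notes on version B (the rewrite author's own statement) =====
-- stated objective: faster
-- what changed: A steps a shifting mask through a while loop, AND-ing the ever-growing mask against i to emit one bit per iteration; B computes the bit count n up front, masks i once to its low n two's-complement bits, renders that value as a zero-padded binary string with format/zfill, and emits the digits of that string back-to-front.
import Mathlib
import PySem

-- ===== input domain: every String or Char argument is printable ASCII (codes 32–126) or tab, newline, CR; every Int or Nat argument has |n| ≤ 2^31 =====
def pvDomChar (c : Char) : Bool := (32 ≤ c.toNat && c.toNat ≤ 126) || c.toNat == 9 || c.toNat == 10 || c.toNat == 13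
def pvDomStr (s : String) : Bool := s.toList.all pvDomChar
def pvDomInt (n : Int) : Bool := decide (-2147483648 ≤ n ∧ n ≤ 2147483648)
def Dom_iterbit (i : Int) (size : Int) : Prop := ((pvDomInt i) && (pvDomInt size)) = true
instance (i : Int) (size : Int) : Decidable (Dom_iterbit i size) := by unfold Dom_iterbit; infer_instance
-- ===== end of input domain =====

-- B replaces A's shifting-mask while-loop: it computes the bit count n up front, masks i
-- once to its low n two's-complement bits, renders that value as a zero-padded binary
-- string (format/zfill) and emits the string's digits back-to-front; objective: faster (measured).
-- Both A and B are Python generators; the List Int is the sequence of yielded values.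

-- ===== PORT A =====
-- while (moveb <= i and size==0) or (b_no < size): yield (1 if (moveb&i) else 0); moveb<<=1; b_no+=1
-- 'fuel' is a totality bound only (structural recursion): it is chosen large enough that the
-- loop always stops on its own condition first (proved in pv_fuel_le below), so it never
-- changes the sequence A yields.
def iterbitLoop (i : Int) (size : Int) (moveb : Int) (b_no : Int) : Nat → List Int
  | 0 => []
  | fuel + 1 =>
    if (moveb ≤ i ∧ size = 0) ∨ b_no < size then
      (if PySem.Int.band moveb i ≠ 0 then (1 : Int) else 0)
        :: iterbitLoop i size (moveb * 2) (b_no + 1) fuel   -- moveb <<= 1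
    else []

def iterbit (i : Int) (size : Int) : List Int :=
  iterbitLoop i size 1 0 (i.toNat + size.toNat + 1)

-- ===== PORT B =====
-- format(m, 'b') for a NONNEGATIVE m, ported by hand (exact there: binary digits, MSB first,
-- "0" for 0): pvBinRaw gives the digits of m with no special case for 0, pvBinFmt adds it.
def pvBinRaw : Nat → List Char
  | 0 => []
  | m + 1 => pvBinRaw ((m + 1) / 2) ++ [if (m + 1) % 2 = 1 then '1' else '0']
decreasing_by exact Nat.div_lt_self (Nat.succ_pos m) one_lt_two

def pvBinFmt (m : Nat) : List Char := if m = 0 then ['0'] else pvBinRaw m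

-- n = size if size else max(i, 0).bit_length()
-- if n > 0: for c in reversed(format(i & ((1 << n) - 1), 'b').zfill(n)): yield ord(c) - 48
-- the mask result i & ((1 << n) - 1) is nonnegative, so .toNat below loses nothing
def iterbit_alt (i : Int) (size : Int) : List Int :=
  let n : Int := if size ≠ 0 then size else ((PySem.Int.bitLength (max i 0) : Nat) : Int)
  if 0 < n then
    ((PySem.Chars.zfill (pvBinFmt (PySem.Int.band i (((1 : Int) <<< n.toNat) - 1)).toNat) n).reverse).map
      (fun c => ((c.toNat : Int) - 48))
  else []

-- ===== PRECONDITION & SPEC =====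
def Spec_iterbit (i : Int) (size : Int) (out : List Int) : Prop := out = iterbit_alt i size
instance (i : Int) (size : Int) (out : List Int) : Decidable (Spec_iterbit i size out) := by unfold Spec_iterbit; infer_instance

-- ===== CLAIM (what is proved, stated in full; the proofs are below) =====
def Claim_equal_iterbit : Prop := ∀ (i : Int) (size : Int), Dom_iterbit i size → Spec_iterbit i size (iterbit i size)

-- ===== LEMMAS AND PROOFS =====

-- the number of bits both programs emit
def pvNbits (i : Int) (size : Int) : Nat :=
  if size = 0 then PySem.Int.bitLength (max i 0) else size.toNat

-- ---- B-side: the binary string read back-to-front is the bit sequence ----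

lemma pv_shift_one (k : Nat) : (1 : Int) <<< k = 2 ^ k := by
  rw [Int.shiftLeft_eq, one_mul]

-- Python's  i & ((1 << N) - 1)  is  i % 2^N  (floor/emod), for every sign of i
lemma pv_band_mask (i : Int) (N : Nat) :
    PySem.Int.band i ((2 : Int) ^ N - 1) = i % (2 : Int) ^ N := by
  have hpow : (0 : Int) < 2 ^ N := by positivity
  have hmask : ((2 : Int) ^ N - 1) = ((2 ^ N - 1 : Nat) : Int) := by
    have h1 : (1 : Nat) ≤ 2 ^ N := Nat.one_le_two_pow
    push_cast [h1]
    ring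
  by_cases hi : 0 ≤ i
  · obtain ⟨a, rfl⟩ := Int.eq_ofNat_of_zero_le hi
    rw [hmask, PySem.Int.band_natCast, Nat.and_two_pow_sub_one_eq_mod]
    norm_cast
  · replace hi : i < 0 := by omega
    set m : Nat := (-i - 1).toNat with hm
    have him : i = -(m : Int) - 1 := by omega
    have hband : PySem.Int.band i ((2 : Int) ^ N - 1)
        = ((2 ^ N - 1 - m % 2 ^ N : Nat) : Int) := by
      unfold PySem.Int.band
      rw [if_neg (by omega), if_pos (by omega)]
      have ht : ((2 : Int) ^ N - 1).toNat = 2 ^ N - 1 := by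
        rw [hmask, Int.toNat_natCast]
      rw [ht, ← hm, Nat.and_comm, Nat.and_two_pow_sub_one_eq_mod]
    rw [hband]
    have hdm : ((m / 2 ^ N : Nat) : Int) * ((2 ^ N : Nat) : Int)
        + ((m % 2 ^ N : Nat) : Int) = (m : Int) := by
      exact_mod_cast Nat.div_add_mod' m (2 ^ N)
    have hmlt : m % 2 ^ N < 2 ^ N := Nat.mod_lt _ (by positivity)
    have h1 : (1 : Nat) ≤ 2 ^ N := Nat.one_le_two_pow
    refine (((Int.ediv_emod_unique (a := i) (b := (2 : Int) ^ N)
        (q := -((m / 2 ^ N : Nat) : Int) - 1)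
        (r := ((2 ^ N - 1 - m % 2 ^ N : Nat) : Int)) hpow).mpr ⟨?_, ?_, ?_⟩).2).symm
    · have hc : ((2 ^ N - 1 - m % 2 ^ N : Nat) : Int)
          = ((2 ^ N : Nat) : Int) - 1 - ((m % 2 ^ N : Nat) : Int) := by
        rw [Nat.cast_sub (by omega), Nat.cast_sub h1, Nat.cast_one]
      have hc2 : ((2 : Int) ^ N) = ((2 ^ N : Nat) : Int) := by push_cast; ring
      rw [hc, him, hc2]
      linear_combination (-1 : Int) * hdm
    · positivity
    · have : (2 ^ N - 1 - m % 2 ^ N : Nat) < 2 ^ N := by omega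
      calc ((2 ^ N - 1 - m % 2 ^ N : Nat) : Int) < ((2 ^ N : Nat) : Int) := by exact_mod_cast this
        _ = (2 : Int) ^ N := by push_cast; ring

-- bit k of the masked value is Python's (moveb & i) bit, i.e. (i >> k) & 1
lemma pv_bit_of_emod (i : Int) (N k : Nat) (hk : k < N) :
    ((((i % (2 : Int) ^ N).toNat >>> k) &&& 1 : Nat) : Int) = PySem.Int.band (i >>> k) 1 := by
  have hpow : (0 : Int) < 2 ^ N := by positivity
  set r : Int := i % (2 : Int) ^ N with hr
  have hr0 : 0 ≤ r := Int.emod_nonneg i (by positivity)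
  have hq : i = r + 2 ^ N * (i / 2 ^ N) := by
    have h := Int.emod_add_mul_ediv i ((2 : Int) ^ N)
    linarith
  rw [PySem.Int.band_one, PySem.Int.mod_eq_emod_of_pos (by norm_num),
      Int.shiftRight_eq_div_pow]
  have hsplit : (2 : Int) ^ (N - k) * 2 ^ k = 2 ^ N := by
    rw [← pow_add]
    congr 1
    omega
  have hdiv : i / ((2 ^ k : Nat) : Int)
      = r / ((2 ^ k : Nat) : Int) + (i / 2 ^ N) * 2 ^ (N - k) := by
    have h2k : (((2 ^ k : Nat) : Int)) ≠ 0 := by positivity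
    have hrepr : i = r + ((i / 2 ^ N) * 2 ^ (N - k)) * ((2 ^ k : Nat) : Int) := by
      have hck : ((2 ^ k : Nat) : Int) = (2 : Int) ^ k := by push_cast; ring
      rw [hck, mul_assoc, hsplit]
      linear_combination hq
    calc i / ((2 ^ k : Nat) : Int)
        = (r + ((i / 2 ^ N) * 2 ^ (N - k)) * ((2 ^ k : Nat) : Int)) / ((2 ^ k : Nat) : Int) := by
          rw [← hrepr]
      _ = r / ((2 ^ k : Nat) : Int) + (i / 2 ^ N) * 2 ^ (N - k) :=
          Int.add_mul_ediv_right _ _ h2k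
  rw [hdiv]
  have heven : (i / 2 ^ N) * 2 ^ (N - k) = ((i / 2 ^ N) * 2 ^ (N - k - 1)) * 2 := by
    rw [mul_assoc]
    congr 1
    rw [← pow_succ]
    congr 1
    omega
  rw [heven, Int.add_mul_emod_self_right]
  -- now everything lives in the nonnegative r: push to Nat
  obtain ⟨a, ha⟩ := Int.eq_ofNat_of_zero_le hr0
  rw [ha, Int.toNat_natCast, Nat.shiftRight_eq_div_pow, Nat.and_one_is_mod]
  push_cast
  ring_nf

-- every character format(m,'b') emits for m ≥ 0 is a binary digit
lemma pv_raw_digits (m : Nat) : ∀ c ∈ pvBinRaw m, c = '0' ∨ c = '1' := by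
  induction m using pvBinRaw.induct with
  | case1 =>
    intro c hc
    simp [pvBinRaw] at hc
  | case2 m ih =>
    intro c hc
    rw [pvBinRaw] at hc
    rcases List.mem_append.mp hc with h | h
    · exact ih c h
    · rcases List.mem_singleton.mp h with rfl
      split_ifs <;> simp

lemma pv_len_raw_le (N : Nat) : ∀ r, r < 2 ^ N → (pvBinRaw r).length ≤ N := by
  induction N with
  | zero =>
    intro r hr
    interval_cases r
    simp [pvBinRaw]
  | succ M ih =>
    intro r hr
    match r with
    | 0 => simp [pvBinRaw]
    | s + 1 =>
      rw [pvBinRaw]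
      have hhalf : (s + 1) / 2 < 2 ^ M := by
        rw [Nat.div_lt_iff_lt_mul (by norm_num)]
        calc s + 1 < 2 ^ (M + 1) := hr
          _ = 2 ^ M * 2 := by ring
      have := ih _ hhalf
      simp only [List.length_append, List.length_singleton]
      omega

-- zfill of format(m,'b') to width N is plain left-padding with '0' (no sign in front)
-- zfill on a cons whose head is not a sign, in the padding case, is plain left-padding
lemma pv_zfill_digit_cons (c : Char) (rest : List Char) (w : Int)
    (hw : ¬ w ≤ (((c :: rest).length : Nat) : Int))
    (hsign : ¬ (c = '+' ∨ c = '-')) :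
    PySem.Chars.zfill (c :: rest) w
      = List.replicate (w.toNat - (c :: rest).length) '0' ++ (c :: rest) := by
  unfold PySem.Chars.zfill
  rw [if_neg (by exact_mod_cast hw)]
  exact if_neg hsign

lemma pv_fmt_zfill (m N : Nat) (h1 : 1 ≤ N) (hlen : (pvBinRaw m).length ≤ N) :
    PySem.Chars.zfill (pvBinFmt m) (N : Int)
      = List.replicate (N - (pvBinRaw m).length) '0' ++ pvBinRaw m := by
  by_cases hm : m = 0
  · subst hm
    have hraw : pvBinRaw 0 = [] := by simp [pvBinRaw]
    have hfmt0 : pvBinFmt 0 = ['0'] := by simp [pvBinFmt]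
    rw [hraw, hfmt0, List.append_nil, List.length_nil, Nat.sub_zero]
    by_cases hN1 : N = 1
    · subst hN1
      norm_num [PySem.Chars.zfill]
    · rw [pv_zfill_digit_cons '0' [] (N : Int) (by simp; omega) (by decide),
        Int.toNat_natCast, List.length_singleton]
      rw [show List.replicate (N - 1) '0' ++ ['0'] = List.replicate (N - 1 + 1) '0' by
        rw [List.replicate_add]; simp, show N - 1 + 1 = N by omega]
  · have hfmt : pvBinFmt m = pvBinRaw m := by rw [pvBinFmt, if_neg hm]
    rw [hfmt]
    have hne : pvBinRaw m ≠ [] := by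
      match m, hm with
      | s + 1, _ => rw [pvBinRaw]; simp
    obtain ⟨c, rest, hcs⟩ := List.exists_cons_of_ne_nil hne
    have hc01 : c = '0' ∨ c = '1' := pv_raw_digits m c (by rw [hcs]; simp)
    by_cases hle : (N : Int) ≤ (pvBinRaw m).length
    · have hlN : (pvBinRaw m).length = N := by omega
      unfold PySem.Chars.zfill
      rw [if_pos (by omega), hlN, Nat.sub_self, List.replicate_zero, List.nil_append]
    · have hsign : ¬ (c = '+' ∨ c = '-') := by
        rcases hc01 with rfl | rfl <;> decide
      rw [hcs] at hle ⊢
      rw [pv_zfill_digit_cons c rest (N : Int) (by exact_mod_cast hle) hsign,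
        Int.toNat_natCast]

-- the padded binary string of r < 2^N, reversed and read as digits, is r's bit sequence
lemma pv_bits_string (N : Nat) : ∀ r, r < 2 ^ N →
    ((List.replicate (N - (pvBinRaw r).length) '0' ++ pvBinRaw r).reverse).map
        (fun c => ((c.toNat : Int) - 48))
      = (List.range N).map (fun k => (((r >>> k) &&& 1 : Nat) : Int)) := by
  induction N with
  | zero =>
    intro r hr
    interval_cases r
    simp [pvBinRaw]
  | succ M ih =>
    intro r hr
    match r with
    | 0 =>
      have hraw : pvBinRaw 0 = [] := by simp [pvBinRaw]
      rw [hraw]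
      simp only [List.append_nil, List.length_nil, Nat.sub_zero, List.reverse_replicate,
        List.map_replicate]
      have h0 : (('0'.toNat : Int) - 48) = 0 := by decide
      rw [h0]
      have : ∀ k, (((0 >>> k) &&& 1 : Nat) : Int) = 0 := by
        intro k
        simp
      calc List.replicate (M + 1) (0 : Int)
          = (List.range (M + 1)).map (fun _ => (0 : Int)) := by
            rw [List.map_const', List.length_range]
        _ = (List.range (M + 1)).map (fun k => (((0 >>> k) &&& 1 : Nat) : Int)) := by
            apply List.map_congr_left
            intro k _
            rw [this k]
    | s + 1 =>
      rw [pvBinRaw]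
      have hhalf : (s + 1) / 2 < 2 ^ M := by
        rw [Nat.div_lt_iff_lt_mul (by norm_num)]
        calc s + 1 < 2 ^ (M + 1) := hr
          _ = 2 ^ M * 2 := by ring
      have hlen : (pvBinRaw ((s + 1) / 2)).length ≤ M := pv_len_raw_le M _ hhalf
      set d : Char := if (s + 1) % 2 = 1 then '1' else '0' with hd
      have hlen2 : M + 1 - (pvBinRaw ((s + 1) / 2) ++ [d]).length
          = M - (pvBinRaw ((s + 1) / 2)).length := by
        simp only [List.length_append, List.length_singleton]
        omega
      rw [hlen2, show List.replicate (M - (pvBinRaw ((s + 1) / 2)).length) '0'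
          ++ (pvBinRaw ((s + 1) / 2) ++ [d])
        = (List.replicate (M - (pvBinRaw ((s + 1) / 2)).length) '0'
          ++ pvBinRaw ((s + 1) / 2)) ++ [d] by rw [List.append_assoc]]
      rw [List.reverse_append, List.reverse_singleton, List.singleton_append, List.map_cons]
      rw [List.range_succ_eq_map, List.map_cons, List.map_map]
      congr 1
      · -- head: the last digit of the string is bit 0
        have hbit : ((s + 1) >>> 0) &&& 1 = (s + 1) % 2 := by
          rw [Nat.shiftRight_zero, Nat.and_one_is_mod]
        rw [hbit, hd]
        rcases Nat.mod_two_eq_zero_or_one (s + 1) with h | h <;> simp [h]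
      · -- tail: the rest is the bit string of (s+1)/2
        rw [ih _ hhalf]
        apply List.map_congr_left
        intro k _
        simp only [Function.comp_apply, Nat.succ_eq_add_one]
        rw [show k + 1 = 1 + k by omega, Nat.shiftRight_add, Nat.shiftRight_one]

-- B equals the bit-position map that A's loop is then shown to produce
lemma pv_alt_eq (i size : Int) :
    iterbit_alt i size
      = (List.range (pvNbits i size)).map (fun j : Nat => PySem.Int.band (i >>> j) 1) := by
  unfold iterbit_alt
  set n : Int := if size ≠ 0 then size else ((PySem.Int.bitLength (max i 0) : Nat) : Int) with hn
  have hnt : n.toNat = pvNbits i size := by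
    unfold pvNbits
    by_cases hs : size = 0
    · rw [hn, if_neg (by omega), if_pos hs, Int.toNat_natCast]
    · rw [hn, if_pos hs, if_neg hs]
  by_cases hpos : 0 < n
  · rw [if_pos hpos]
    set N : Nat := pvNbits i size with hN
    have hNn : n.toNat = N := hnt
    have hN1 : 1 ≤ N := by omega
    have hmask : ((1 : Int) <<< n.toNat) - 1 = (2 : Int) ^ N - 1 := by
      rw [pv_shift_one, hNn]
    rw [hmask, pv_band_mask]
    have hpow : (0 : Int) < 2 ^ N := by positivity
    set r : Int := i % (2 : Int) ^ N with hr
    have hr0 : 0 ≤ r := Int.emod_nonneg i (by positivity)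
    have hrlt : r.toNat < 2 ^ N := by
      have h1 : r < 2 ^ N := Int.emod_lt_of_pos i hpow
      have h2 : ((2 ^ N : Nat) : Int) = (2 : Int) ^ N := by push_cast; ring
      omega
    have hzn : (n : Int) = ((N : Nat) : Int) := by omega
    rw [hzn, pv_fmt_zfill r.toNat N hN1 (pv_len_raw_le N _ hrlt),
      pv_bits_string N r.toNat hrlt]
    apply List.map_congr_left
    intro k hk
    exact pv_bit_of_emod i N k (List.mem_range.mp hk)
  · rw [if_neg hpos]
    have : pvNbits i size = 0 := by
      rw [← hnt]
      omega
    rw [this]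
    simp

-- ---- A-side: the loop emits exactly those bits ----

-- bit value: Python '1 if (2^k & i) else 0' equals '(i >> k) & 1'
lemma pv_bitval (i : Int) (j : Nat) :
    (if PySem.Int.band ((2 : Int) ^ j) i ≠ 0 then (1 : Int) else 0)
      = PySem.Int.band (i >>> j) 1 := by
  rw [PySem.Int.band_one, PySem.Int.mod_eq_emod_of_pos (by norm_num),
      Int.shiftRight_eq_div_pow,
      show ((2 : Int) ^ j) = ((2 ^ j : Nat) : Int) by push_cast; ring]
  have hpow : (0 : Int) ≤ ((2 ^ j : Nat) : Int) := by positivity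
  by_cases hi : 0 ≤ i
  · obtain ⟨n, rfl⟩ := Int.eq_ofNat_of_zero_le hi
    rw [PySem.Int.band_of_nonneg hpow hi, Int.toNat_natCast, Int.toNat_natCast,
        Nat.two_pow_and, Nat.testBit_eq_decide_div_mod_eq,
        ← Int.natCast_ediv]
    by_cases hb : n / 2 ^ j % 2 = 1
    · rw [hb]
      simp only [decide_true, Bool.toNat_true, mul_one]
      rw [if_pos (by positivity)]
      omega
    · have hb0 : n / 2 ^ j % 2 = 0 := by omega
      simp only [hb, decide_false, Bool.toNat_false, mul_zero, Nat.cast_zero]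
      rw [if_neg (by omega)]
      omega
  · replace hi : i < 0 := by omega
    set m : Nat := (-i - 1).toNat with hm
    have him : i = -(m : Int) - 1 := by omega
    have hband : PySem.Int.band (((2 ^ j : Nat) : Int)) i
        = ((2 ^ j - (2 ^ j &&& m) : Nat) : Int) := by
      unfold PySem.Int.band
      rw [if_pos hpow, if_neg (by omega)]
      have htn : ((2 : Int) ^ j).toNat = 2 ^ j := by
        rw [show ((2 : Int) ^ j) = ((2 ^ j : Nat) : Int) by push_cast; ring,
          Int.toNat_natCast]
      simp [← hm, htn]
    rw [hband]
    have hq : i / (((2 ^ j : Nat)) : Int) = -((m / 2 ^ j : Nat) : Int) - 1 := by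
      have hb : (0 : Int) < ((2 ^ j : Nat) : Int) := by positivity
      have hmod : ((m % 2 ^ j : Nat) : Int) < ((2 ^ j : Nat) : Int) := by
        have : m % 2 ^ j < 2 ^ j := Nat.mod_lt _ (by positivity)
        exact_mod_cast this
      have hdm : ((m / 2 ^ j : Nat) : Int) * ((2 ^ j : Nat) : Int)
          + ((m % 2 ^ j : Nat) : Int) = (m : Int) := by
        exact_mod_cast Nat.div_add_mod' m (2 ^ j)
      exact ((Int.ediv_emod_unique (a := i) (b := ((2 ^ j : Nat) : Int))
          (q := -((m / 2 ^ j : Nat) : Int) - 1)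
          (r := ((2 ^ j : Nat) : Int) - 1 - ((m % 2 ^ j : Nat) : Int)) hb).mpr
        ⟨by rw [him]; linear_combination (-1 : Int) * hdm, by omega, by omega⟩).1
    rw [hq, Nat.two_pow_and, Nat.testBit_eq_decide_div_mod_eq]
    by_cases hb : m / 2 ^ j % 2 = 1
    · simp only [hb, decide_true, Bool.toNat_true, mul_one, Nat.sub_self,
        Nat.cast_zero, ne_eq, not_true_eq_false, ite_false]
      omega
    · have hb0 : m / 2 ^ j % 2 = 0 := by omega
      simp only [hb, decide_false, Bool.toNat_false, mul_zero, Nat.sub_zero]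
      rw [if_pos (by positivity)]
      omega

-- the loop condition at state (moveb, b_no) = (2^k, k) tests exactly k < pvNbits
lemma pv_cond_iff (i size : Int) (k : Nat) :
    (((2 : Int) ^ k ≤ i ∧ size = 0) ∨ (k : Int) < size) ↔ k < pvNbits i size := by
  unfold pvNbits
  by_cases hs : size = 0
  · subst hs
    rw [if_pos rfl]
    have h5 : (((2 : Nat) ^ k : Nat) : Int) = (2 : Int) ^ k := by push_cast; ring
    constructor
    · rintro (⟨hle, -⟩ | hlt)
      · by_contra hk
        replace hk : PySem.Int.bitLength (max i 0) ≤ k := by omega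
        have h1 : (max i 0).natAbs < 2 ^ PySem.Int.bitLength (max i 0) :=
          PySem.Int.lt_two_pow_bitLength _
        have h2 : (2 : Nat) ^ PySem.Int.bitLength (max i 0) ≤ 2 ^ k :=
          Nat.pow_le_pow_right (by norm_num) hk
        omega
      · omega
    · intro hk
      left
      refine ⟨?_, rfl⟩
      have hne : max i 0 ≠ 0 := by
        intro h
        rw [h, PySem.Int.bitLength_zero] at hk
        omega
      have h2 : 2 ^ (PySem.Int.bitLength (max i 0) - 1) ≤ (max i 0).natAbs :=
        PySem.Int.two_pow_bitLength_le _ hne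
      have h3 : (2 : Nat) ^ k ≤ 2 ^ (PySem.Int.bitLength (max i 0) - 1) :=
        Nat.pow_le_pow_right (by norm_num) (by omega)
      omega
  · rw [if_neg hs]
    constructor
    · rintro (⟨-, h⟩ | hlt)
      · exact absurd h hs
      · omega
    · intro hk
      right
      omega

-- the fuel iterbit hands the loop covers every iteration the loop condition allows
lemma pv_fuel_le (i size : Int) : pvNbits i size ≤ i.toNat + size.toNat + 1 := by
  unfold pvNbits
  by_cases hs : size = 0
  · rw [if_pos hs]
    by_cases hi : i ≤ 0
    · have : max i 0 = 0 := by omega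
      rw [this, PySem.Int.bitLength_zero]
      omega
    · have hne : max i 0 ≠ 0 := by omega
      have h2 : 2 ^ (PySem.Int.bitLength (max i 0) - 1) ≤ (max i 0).natAbs :=
        PySem.Int.two_pow_bitLength_le _ hne
      have h3 : PySem.Int.bitLength (max i 0) - 1
          < 2 ^ (PySem.Int.bitLength (max i 0) - 1) :=
        Nat.lt_two_pow_self
      omega
  · rw [if_neg hs]
    omega

-- the loop from state (2^k, k) emits the bits at positions k … pvNbits-1
lemma pv_loop_eq (i size : Int) :
    ∀ (m k fuel : Nat), pvNbits i size - k = m → m ≤ fuel →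
      iterbitLoop i size ((2 : Int) ^ k) (k : Int) fuel
        = (List.range' k m).map (fun j : Nat => PySem.Int.band (i >>> j) 1) := by
  intro m
  induction m with
  | zero =>
    intro k fuel hk _
    cases fuel with
    | zero => simp [iterbitLoop]
    | succ fuel =>
      rw [iterbitLoop, if_neg]
      · simp
      · intro hcond
        have := (pv_cond_iff i size k).mp hcond
        omega
  | succ m ih =>
    intro k fuel hk hf
    cases fuel with
    | zero => omega
    | succ fuel =>
      rw [iterbitLoop,
        if_pos ((pv_cond_iff i size k).mpr (by omega)),
        List.range'_succ, List.map_cons]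
      congr 1
      · exact pv_bitval i k
      · rw [show (2 : Int) ^ k * 2 = (2 : Int) ^ (k + 1) by ring,
          show (k : Int) + 1 = ((k + 1 : Nat) : Int) by push_cast; ring]
        exact ih (k + 1) fuel (by omega) (by omega)

-- ===== VERDICT (by name: the statement is the Claim_ definition above) =====
theorem iterbit_spec : Claim_equal_iterbit := by
  intro i size _
  unfold Spec_iterbit iterbit
  have h := pv_loop_eq i size (pvNbits i size) 0 (i.toNat + size.toNat + 1)
    (by omega) (pv_fuel_le i size)
  simp only [pow_zero, Nat.cast_zero] at h
  rw [h, pv_alt_eq, List.range_eq_range']
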